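-- pv_equiv track=rewrite | github.com/ltfafei/py_Leetcode_study | magical_DataQueue/12.listCut_and_BubbleSort.py | listCut_2
-- ===== SOURCE A (Python) =====
-- def listCut_2(l):
--     lMax = None  #定义最大值
--     rMin = None  #定义最小值
--     for i in range(1, len(l)):
--         left = l[:i]
--         right = l[i:]
--         if lMax == None:
--             lMax = max(left)
--         #不等于None，追加到左边
--         elif lMax < l[i-1]:
--             lMax = l[i-1]
--         if rMin == None:
--             rMin = min(right)
--         elif rMin >= l[i-1]:
--             rMin = min(right)
--         #比较
--         if lMax <= rMin:
--             return i-1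
-- ===== SOURCE B (Python) =====
-- def listCut_2(l):
--     if not l:
--         return None
--     x, rest = l[0], l[1:]
--     # suffix minima of rest, built right to left
--     suf = []
--     for v in reversed(rest):
--         suf.append(v if not suf else min(v, suf[-1]))
--     suf.reverse()
--     # one left-to-right pass with a running prefix max
--     pmax = x
--     i = 1
--     for v, s in zip(rest, suf):
--         if pmax <= s:
--             return i - 1
--         pmax = max(pmax, v)
--         i += 1
--     return None
-- ===== Notes on version B (the rewrite author's own statement) =====
-- stated objective: faster
-- what changed: Replaces A's per-step slicing and repeated min(right) recomputation (quadratic worst case) with a precomputed suffix-minima array and a single running-prefix-max pass.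
import Mathlib
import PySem

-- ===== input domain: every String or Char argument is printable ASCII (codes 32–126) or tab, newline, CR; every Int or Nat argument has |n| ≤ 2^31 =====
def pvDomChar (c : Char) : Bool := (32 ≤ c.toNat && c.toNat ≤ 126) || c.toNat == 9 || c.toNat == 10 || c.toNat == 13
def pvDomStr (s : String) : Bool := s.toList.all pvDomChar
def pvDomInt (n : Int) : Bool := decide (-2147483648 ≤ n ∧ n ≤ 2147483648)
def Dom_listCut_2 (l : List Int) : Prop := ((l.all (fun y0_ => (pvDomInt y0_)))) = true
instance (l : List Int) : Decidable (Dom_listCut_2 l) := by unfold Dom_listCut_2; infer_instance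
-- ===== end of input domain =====

-- B replaces A's per-step slices and repeated min(right) recomputation with a precomputed
-- suffix-minima list and one running-prefix-max pass (objective: faster, O(n) vs O(n^2)).

-- ===== PORT A =====
-- for i in range(1, len(l)): transcribed as index recursion from i = 1 while i < len l
def listCut_2_loop (l : List Int) (i : Nat) (lMax rMin : Option Int) : Option Int :=
  if _h : i < l.length then
    let left := PySem.List.slice l none (some (i : Int))
    let right := PySem.List.slice l (some (i : Int)) none
    -- l[i-1]: always in range here since 1 ≤ i < len l on every call
    let li1 : Int := PySem.List.pyGetD l ((i : Int) - 1) 0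
    let lMax' : Option Int :=
      match lMax with
      | none => PySem.List.max? left (fun y => y)
      | some m => if m < li1 then some li1 else some m
    let rMin' : Option Int :=
      match rMin with
      | none => PySem.List.min? right (fun y => y)
      | some m => if li1 ≤ m then PySem.List.min? right (fun y => y) else some m
    -- left and right are nonempty here, so lMax'/rMin' are always `some`; .getD 0 is the int comparison
    if lMax'.getD 0 ≤ rMin'.getD 0 then some ((i : Int) - 1)
    else listCut_2_loop l (i + 1) lMax' rMin'
  else none
termination_by l.length - i

def listCut_2 (l : List Int) : Option Int := listCut_2_loop l 1 none none

-- ===== PORT B =====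
-- suffix minima of a list, built right to left (Source B's first loop)
def sufMins : List Int → List Int
  | [] => []
  | v :: vs =>
    match sufMins vs with
    | [] => [v]
    | s :: ss => min v s :: s :: ss

-- Source B's second loop: running prefix max over rest, zipped with the suffix minima
def listCut_2_go (pmax : Int) (i : Int) : List Int → List Int → Option Int
  | v :: vs, s :: ss =>
    if pmax ≤ s then some (i - 1) else listCut_2_go (max pmax v) (i + 1) vs ss
  | _, _ => none

def listCut_2_alt (l : List Int) : Option Int :=
  match l with
  | [] => none
  | x :: rest => listCut_2_go x 1 rest (sufMins rest)

-- ===== PRECONDITION & SPEC =====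
def Spec_listCut_2 (l : List Int) (out : Option Int) : Prop := out = listCut_2_alt l
instance (l : List Int) (out : Option Int) : Decidable (Spec_listCut_2 l out) := by unfold Spec_listCut_2; infer_instance

-- ===== CLAIM (what is proved, stated in full; the proofs are below) =====
def Claim_equal_listCut_2 : Prop := ∀ (l : List Int), Dom_listCut_2 l → Spec_listCut_2 l (listCut_2 l)

-- ===== LEMMAS AND PROOFS =====

lemma foldl_min_cons (a b : Int) (bs : List Int) :
    (b :: bs).foldl min a = min a (bs.foldl min b) := by
  show List.foldl min (min a b) bs = min a (List.foldl min b bs)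
  exact List.foldl_assoc

lemma sufMins_cons (a : Int) (as : List Int) :
    sufMins (a :: as) = (as.foldl min a) :: sufMins as := by
  induction as generalizing a with
  | nil => simp [sufMins]
  | cons b bs ih =>
    rw [sufMins, ih b, foldl_min_cons]

lemma loop_eq_go : ∀ (rest pre : List Int) (li1 M R pmax : Int),
    R = rest.foldl min li1 → pmax = max M li1 →
    listCut_2_loop (pre ++ li1 :: rest) (pre.length + 1) (some M) (some R)
      = listCut_2_go pmax ((pre.length : Int) + 1) rest (sufMins rest) := by
  intro rest
  induction rest with
  | nil =>
    intro pre li1 M R pmax _ _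
    rw [listCut_2_loop]
    simp [listCut_2_go]
  | cons a as ih =>
    intro pre li1 M R pmax hR hp
    rw [listCut_2_loop]
    have hlen : pre.length + 1 < (pre ++ li1 :: a :: as).length := by
      simp
    rw [dif_pos hlen]
    have hidx : ((pre.length + 1 : Nat) : Int) - 1 = ((pre.length : Nat) : Int) := by push_cast; omega
    have hget : PySem.List.pyGetD (pre ++ li1 :: a :: as) (((pre.length + 1 : Nat) : Int) - 1) 0 = li1 := by
      rw [hidx, PySem.List.pyGetD_natCast]
      simp [List.getD]
    have hdrop : PySem.List.slice (pre ++ li1 :: a :: as) (some ((pre.length + 1 : Nat) : Int)) none = a :: as := by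
      rw [PySem.List.slice_from_natCast]
      simp
    rw [hget, hdrop]
    simp only []
    have hmax : (if M < li1 then some li1 else some M) = some (max M li1) := by
      split_ifs <;> (congr 1; omega)
    have hminr : PySem.List.min? (a :: as) (fun y => y) = some (as.foldl min a) :=
      PySem.List.min?_id_cons a as
    have hRval : R = min li1 (as.foldl min a) := by rw [hR, foldl_min_cons]
    have hmin : (if li1 ≤ R then PySem.List.min? (a :: as) (fun y => y) else some R)
        = some (as.foldl min a) := by
      rw [hminr]; split_ifs with h
      · rfl
      · congr 1; omega
    rw [hmax, hmin]
    simp only [Option.getD_some]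
    rw [sufMins_cons, listCut_2_go, hp]
    by_cases hc : max M li1 ≤ as.foldl min a
    · rw [if_pos hc, if_pos hc]
      congr 1
    · rw [if_neg hc, if_neg hc]
      have := ih (pre ++ [li1]) a (max M li1) (as.foldl min a) (max (max M li1) a) rfl rfl
      simp only [List.append_assoc, List.cons_append, List.nil_append, List.length_append,
        List.length_cons, List.length_nil] at this
      rw [show pre.length + 1 + 1 = pre.length + (0 + 1) + 1 from by ring] at this
      rw [show ((pre.length + (0 + 1) : Nat) : Int) + 1 = (pre.length : Int) + 1 + 1 from by
        push_cast; ring] at this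
      rw [this]

lemma listCut_2_eq_alt (l : List Int) : listCut_2 l = listCut_2_alt l := by
  match l with
  | [] =>
    rw [listCut_2, listCut_2_loop]
    simp [listCut_2_alt]
  | [x] =>
    rw [listCut_2, listCut_2_loop]
    simp [listCut_2_alt, listCut_2_go]
  | x :: a :: as =>
    rw [listCut_2, listCut_2_loop]
    have h1 : (1 : Nat) < (x :: a :: as).length := by simp
    rw [dif_pos h1]
    have hleft : PySem.List.slice (x :: a :: as) none (some ((1 : Nat) : Int)) = [x] := by
      rw [PySem.List.slice_to_natCast]; rfl
    have hright : PySem.List.slice (x :: a :: as) (some ((1 : Nat) : Int)) none = a :: as := by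
      rw [PySem.List.slice_from_natCast]; rfl
    rw [hleft, hright]
    simp only []
    rw [show PySem.List.max? [x] (fun y => y) = some x from by simpa using PySem.List.max?_id_cons x ([] : List Int)]
    rw [show PySem.List.min? (a :: as) (fun y => y) = some (as.foldl min a) from
      PySem.List.min?_id_cons a as]
    simp only [Option.getD_some]
    rw [listCut_2_alt, sufMins_cons, listCut_2_go]
    by_cases hc : x ≤ as.foldl min a
    · rw [if_pos hc, if_pos hc]
      norm_num
    · rw [if_neg hc, if_neg hc]
      have := loop_eq_go as [x] a x (as.foldl min a) (max x a) rfl rfl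
      simp only [List.cons_append, List.nil_append, List.length_cons, List.length_nil] at this
      rw [show (0:Nat) + 1 + 1 = 2 from rfl] at this
      rw [this]
      norm_num

-- ===== VERDICT (by name: the statement is the Claim_ definition above) =====
theorem listCut_2_spec : Claim_equal_listCut_2 := by
  intro l _
  unfold Spec_listCut_2
  exact listCut_2_eq_alt l
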